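-- pv_equiv track=rewrite | github.com/sonalgan/gtfs_static | scripts/main.py | extract_route_info
-- ===== SOURCE A (Python) =====
-- def extract_route_info(timetable):
--     """
--     Extracts route information from the given timetable.
--
--     Args:
--         timetable (list): List of rows representing a timetable.
--
--     Returns:
--         dict: Route information.
--     """
--     route_info = {"Route_Code": None, "Route_Origin": None, "Route_Destination": None}
--     for row in timetable:
--         if isinstance(row[0], str):
--             if row[0].strip().lower().startswith("route"):
--                 route_info["Route_Code"] = row[1]
--             elif row[0].strip().lower() in ["brand", "vajra"]:
--                 if row[2]:
--                     route_info["Route_Origin"] = row[2] if route_info["Route_Origin"] is None else route_info["Route_Origin"]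
--                     route_info["Route_Destination"] = row[2] if route_info["Route_Destination"] is None else route_info["Route_Destination"]
--     return route_info
-- ===== SOURCE B (Python) =====
-- def extract_route_info(timetable):
--     """Same extraction, decomposed into independent full scans instead of one
--     stateful accumulating loop: last route code, first truthy brand/vajra cell
--     (shared by origin and destination)."""
--     codes = [row[1] for row in timetable
--              if isinstance(row[0], str)
--              and row[0].strip().lower().startswith("route")]
--     origins = [row[2] for row in timetable
--                if isinstance(row[0], str)
--                and row[0].strip().lower() in ("brand", "vajra")]
--     shared = next((v for v in origins if v), None)
--     return {"Route_Code": codes[-1] if codes else None,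
--             "Route_Origin": shared,
--             "Route_Destination": shared}
-- ===== Notes on version B (the rewrite author's own statement) =====
-- stated objective: simpler
-- what changed: Replaces the single stateful loop mutating a dict (with is-None guards) by two independent full-scan comprehensions plus a last-element / first-truthy selection, assembled into the result dict at the end.
import Mathlib
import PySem

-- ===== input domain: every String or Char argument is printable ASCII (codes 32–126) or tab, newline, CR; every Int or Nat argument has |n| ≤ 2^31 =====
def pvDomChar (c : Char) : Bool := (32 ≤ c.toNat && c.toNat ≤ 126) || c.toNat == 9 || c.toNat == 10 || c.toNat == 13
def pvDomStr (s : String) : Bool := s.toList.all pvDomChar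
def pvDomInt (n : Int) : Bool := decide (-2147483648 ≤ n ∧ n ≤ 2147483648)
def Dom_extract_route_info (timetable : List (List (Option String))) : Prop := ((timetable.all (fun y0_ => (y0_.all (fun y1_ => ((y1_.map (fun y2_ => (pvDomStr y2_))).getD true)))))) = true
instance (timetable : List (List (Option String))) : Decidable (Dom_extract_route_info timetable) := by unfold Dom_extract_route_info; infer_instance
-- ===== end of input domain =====

-- B replaces A's single stateful dict-mutating loop by independent full scans
-- (last route code, first truthy brand/vajra cell) — objective: simpler.

-- ===== PORT A =====
-- truthiness of a cell ('if row[2]:'): non-None and non-empty string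
def pvTruthy (v : Option String) : Bool :=
  match v with
  | some s => !(s == "")
  | none => false

-- one iteration of A's for-loop body over the mutable dict
def pvStepA (d : PySem.Dict String (Option String)) (row : List (Option String)) :
    PySem.Dict String (Option String) :=
  match PySem.List.pyGet? row 0 with
  | some (some s) =>
      if PySem.Str.startswith (PySem.Str.lower (PySem.Str.strip s)) "route" then
        match PySem.List.pyGet? row 1 with
        | some v => d.insert "Route_Code" v
        | none => d     -- IndexError on row[1]; excluded by Pre_
      else if PySem.Str.lower (PySem.Str.strip s) == "brand"
              || PySem.Str.lower (PySem.Str.strip s) == "vajra" then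
        match PySem.List.pyGet? row 2 with
        | some v =>
            if pvTruthy v then
              let d1 := d.insert "Route_Origin"
                (if (d.getD "Route_Origin" none).isNone then v else d.getD "Route_Origin" none)
              d1.insert "Route_Destination"
                (if (d1.getD "Route_Destination" none).isNone then v else d1.getD "Route_Destination" none)
            else d
        | none => d     -- IndexError on row[2]; excluded by Pre_
      else d
  | some none => d
  | none => d           -- IndexError on row[0]; excluded by Pre_

def extract_route_info (timetable : List (List (Option String))) : List (String × Option String) :=
  (timetable.foldl pvStepA
    (((PySem.Dict.empty.insert "Route_Code" none).insert "Route_Origin" none).insert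
      "Route_Destination" none)).items

-- ===== PORT B =====
-- row[i], total form: the index is in range on every row B actually touches inside Pre_
def pvCell (row : List (Option String)) (i : Int) : Option String :=
  (PySem.List.pyGet? row i).getD none

def pvIsRoute (row : List (Option String)) : Bool :=
  match pvCell row 0 with
  | some s => PySem.Str.startswith (PySem.Str.lower (PySem.Str.strip s)) "route"
  | none => false

def pvIsBrand (row : List (Option String)) : Bool :=
  match pvCell row 0 with
  | some s => PySem.Str.lower (PySem.Str.strip s) == "brand"
              || PySem.Str.lower (PySem.Str.strip s) == "vajra"
  | none => false

def extract_route_info_alt (timetable : List (List (Option String))) :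
    List (String × Option String) :=
  let codes := (timetable.filter pvIsRoute).map (fun r => pvCell r 1)
  let origins := (timetable.filter pvIsBrand).map (fun r => pvCell r 2)
  let shared := (origins.find? pvTruthy).getD none
  [("Route_Code", if codes.isEmpty then none else pvCell codes (-1)),
   ("Route_Origin", shared),
   ("Route_Destination", shared)]

-- ===== PRECONDITION & SPEC =====
-- Pre_ excludes exactly the inputs where A raises IndexError: an empty row,
-- a route row shorter than 2, or a brand/vajra row shorter than 3.
def Pre_extract_route_info (timetable : List (List (Option String))) : Prop :=
  ∀ row ∈ timetable, row ≠ [] ∧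
    (pvIsRoute row = true → 2 ≤ row.length) ∧
    (pvIsBrand row = true → 3 ≤ row.length)
instance (timetable : List (List (Option String))) : Decidable (Pre_extract_route_info timetable) := by
  unfold Pre_extract_route_info; infer_instance

def pvWitness_extract_route_info : List (List (Option String)) :=
  [[some "Route", some "R1"], [some " Brand ", none, some "Majestic"]]

def Spec_extract_route_info (timetable : List (List (Option String))) (out : List (String × Option String)) : Prop := out = extract_route_info_alt timetable
instance (timetable : List (List (Option String))) (out : List (String × Option String)) : Decidable (Spec_extract_route_info timetable out) := by unfold Spec_extract_route_info; infer_instance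

-- ===== CLAIM (what is proved, stated in full; the proofs are below) =====
def Claim_equal_extract_route_info : Prop := ∀ (timetable : List (List (Option String))), Dom_extract_route_info timetable → Pre_extract_route_info timetable → Spec_extract_route_info timetable (extract_route_info timetable)

-- ===== LEMMAS AND PROOFS =====

-- the dict A's loop maintains: always exactly these three keys, in this order
def pvMkd (c o p : Option String) : PySem.Dict String (Option String) :=
  PySem.Dict.mk [("Route_Code", c), ("Route_Origin", o), ("Route_Destination", p)]

lemma pvMkd_insert_code (c o p v : Option String) :
    (pvMkd c o p).insert "Route_Code" v = pvMkd v o p := by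
  simp [pvMkd, PySem.Dict.insert, PySem.Dict.contains]

lemma pvMkd_insert_orig (c o p v : Option String) :
    (pvMkd c o p).insert "Route_Origin" v = pvMkd c v p := by
  simp [pvMkd, PySem.Dict.insert, PySem.Dict.contains]

lemma pvMkd_insert_dest (c o p v : Option String) :
    (pvMkd c o p).insert "Route_Destination" v = pvMkd c o v := by
  simp [pvMkd, PySem.Dict.insert, PySem.Dict.contains]

lemma pvMkd_getD_orig (c o p : Option String) :
    (pvMkd c o p).getD "Route_Origin" none = o := by
  simp [pvMkd, PySem.Dict.getD, PySem.Dict.get?]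

lemma pvMkd_getD_dest (c o p : Option String) :
    (pvMkd c o p).getD "Route_Destination" none = p := by
  simp [pvMkd, PySem.Dict.getD, PySem.Dict.get?]

-- last of (a :: l) with default c = last of l with default a
lemma pvLastD_cons {α : Type} (a c : α) (l : List α) :
    ((a :: l).getLast?).getD c = (l.getLast?).getD a := by
  induction l with
  | nil => rfl
  | cons b t ih => cases t <;> simp_all [List.getLast?]

-- a brand/vajra key never startswith "route"
lemma pvBrand_not_route (row : List (Option String)) (h : pvIsBrand row = true) :
    pvIsRoute row = false := by
  cases hc : pvCell row 0 with
  | none => simp [pvIsRoute, hc]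
  | some s =>
    simp only [pvIsBrand, hc] at h
    rcases Bool.or_eq_true_iff.mp h with h' | h' <;>
      · simp only [pvIsRoute, hc, eq_of_beq h']; decide

def pvCodeRes (t : List (List (Option String))) (c : Option String) : Option String :=
  (((t.filter pvIsRoute).map (fun r => pvCell r 1)).getLast?).getD c

def pvOrigRes (t : List (List (Option String))) (o : Option String) : Option String :=
  match o with
  | some x => some x
  | none => (((t.filter pvIsBrand).map (fun r => pvCell r 2)).find? pvTruthy).getD none

set_option maxHeartbeats 1000000 in
-- loop invariant for A's fold
lemma pvFoldA (t : List (List (Option String)))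
    (hp : ∀ row ∈ t, row ≠ [] ∧ (pvIsRoute row = true → 2 ≤ row.length) ∧
          (pvIsBrand row = true → 3 ≤ row.length))
    (c o p : Option String) :
    t.foldl pvStepA (pvMkd c o p) = pvMkd (pvCodeRes t c) (pvOrigRes t o) (pvOrigRes t p) := by
  induction t generalizing c o p with
  | nil => cases o <;> cases p <;> rfl
  | cons row rest ih =>
    obtain ⟨hne, hr2, hb3⟩ := hp row (List.mem_cons_self ..)
    have hp' : ∀ r ∈ rest, r ≠ [] ∧ (pvIsRoute r = true → 2 ≤ r.length) ∧
        (pvIsBrand r = true → 3 ≤ r.length) := fun r hr => hp r (List.mem_cons_of_mem _ hr)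
    obtain ⟨x, row', rfl⟩ : ∃ x row', row = x :: row' := by
      cases row with | nil => exact absurd rfl hne | cons x r => exact ⟨x, r, rfl⟩
    have h0 : PySem.List.pyGet? (x :: row') 0 = some x := PySem.List.pyGet?_zero_cons ..
    have hcell : pvCell (x :: row') 0 = x := by simp [pvCell]
    simp only [List.foldl_cons]
    cases x with
    | none =>
      have hR : pvIsRoute (none :: row') = false := by simp only [pvIsRoute, hcell]
      have hB : pvIsBrand (none :: row') = false := by simp only [pvIsBrand, hcell]
      have hstep : pvStepA (pvMkd c o p) (none :: row') = pvMkd c o p := by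
        unfold pvStepA; rw [h0]
      rw [hstep, ih hp']
      simp [pvCodeRes, pvOrigRes, hR, hB]
    | some s =>
      by_cases hRt : PySem.Str.startswith (PySem.Str.lower (PySem.Str.strip s)) "route" = true
      · -- route row: Route_Code overwritten with row[1]
        have hR : pvIsRoute (some s :: row') = true := by simp only [pvIsRoute, hcell, hRt]
        have hB : pvIsBrand (some s :: row') = false := by
          cases hb : pvIsBrand (some s :: row') with
          | false => rfl
          | true => exact absurd hR (by simp [pvBrand_not_route _ hb])
        have hlen : 1 < (some s :: row').length := by have := hr2 hR; omega
        obtain ⟨w1, h1⟩ : ∃ w, PySem.List.pyGet? (some s :: row') 1 = some w :=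
          ⟨_, by simpa using PySem.List.pyGet?_ofNat (some s :: row') 1 hlen⟩
        have hstep : pvStepA (pvMkd c o p) (some s :: row') = pvMkd w1 o p := by
          unfold pvStepA
          rw [h0]
          simp only [hRt, if_true, h1]
          exact pvMkd_insert_code ..
        rw [hstep, ih hp']
        have hc1 : pvCell (some s :: row') 1 = w1 := by
          simp [pvCell, h1]
        simp [pvCodeRes, pvOrigRes, hR, hB, hc1, pvLastD_cons]
      · have hRt' : PySem.Str.startswith (PySem.Str.lower (PySem.Str.strip s)) "route" = false :=
          Bool.eq_false_iff.mpr hRt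
        have hR : pvIsRoute (some s :: row') = false := by
          simp only [pvIsRoute, hcell]; exact hRt'
        by_cases hBr : (PySem.Str.lower (PySem.Str.strip s) == "brand"
              || PySem.Str.lower (PySem.Str.strip s) == "vajra") = true
        · -- brand/vajra row
          have hB : pvIsBrand (some s :: row') = true := by
            simp only [pvIsBrand, hcell, hBr]
          have hlen : 2 < (some s :: row').length := by have := hb3 hB; omega
          obtain ⟨w, h2⟩ : ∃ w, PySem.List.pyGet? (some s :: row') 2 = some w :=
            ⟨_, by simpa using PySem.List.pyGet?_ofNat (some s :: row') 2 hlen⟩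
          have hc2 : pvCell (some s :: row') 2 = w := by
            simp [pvCell, h2]
          by_cases ht : pvTruthy w = true
          · -- truthy cell: origin/destination filled where still None
            have hstep : pvStepA (pvMkd c o p) (some s :: row')
                = pvMkd c (if o.isNone then w else o)
                          (if p.isNone then w else p) := by
              unfold pvStepA
              rw [h0]
              simp only [hRt', Bool.false_eq_true, if_false, hBr, if_true, h2, ht,
                pvMkd_getD_orig, pvMkd_insert_orig, pvMkd_getD_dest, pvMkd_insert_dest]
            rw [hstep, ih hp']
            obtain ⟨v, hv⟩ : ∃ v, w = some v := by
              cases hx : w with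
              | none => rw [hx] at ht; exact absurd ht (by simp [pvTruthy])
              | some v => exact ⟨v, rfl⟩
            have hcode : pvCodeRes ((some s :: row') :: rest) c = pvCodeRes rest c := by
              simp [pvCodeRes, hR]
            have horig : ∀ q : Option String,
                pvOrigRes rest (if q.isNone then w else q)
                  = pvOrigRes ((some s :: row') :: rest) q := by
              intro q
              cases q with
              | some y => rfl
              | none =>
                rw [hv] at ht
                simp [pvOrigRes, hB, hc2, hv, ht]
            rw [hcode, horig o, horig p]
          · -- falsy cell: nothing changes
            have ht' : pvTruthy w = false := Bool.eq_false_iff.mpr ht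
            have hstep : pvStepA (pvMkd c o p) (some s :: row') = pvMkd c o p := by
              unfold pvStepA
              rw [h0]
              simp only [hRt', Bool.false_eq_true, if_false, hBr, if_true, h2, ht']
            rw [hstep, ih hp']
            simp [pvCodeRes, pvOrigRes, hR, hB, hc2, ht']
        · -- neither
          have hB : pvIsBrand (some s :: row') = false := by
            simp only [pvIsBrand, hcell]; exact Bool.eq_false_iff.mpr hBr
          have hBr' : (PySem.Str.lower (PySem.Str.strip s) == "brand"
              || PySem.Str.lower (PySem.Str.strip s) == "vajra") = false :=
            Bool.eq_false_iff.mpr hBr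
          have hstep : pvStepA (pvMkd c o p) (some s :: row') = pvMkd c o p := by
            unfold pvStepA
            rw [h0]
            simp only [hRt', Bool.false_eq_true, if_false, hBr']
          rw [hstep, ih hp']
          simp [pvCodeRes, pvOrigRes, hR, hB]

lemma pvInit : ((PySem.Dict.empty.insert "Route_Code" (none : Option String)).insert
    "Route_Origin" none).insert "Route_Destination" none = pvMkd none none none := by
  rfl

-- ===== VERDICT (by name: the statement is the Claim_ definition above) =====
theorem extract_route_info_spec : Claim_equal_extract_route_info := by
  intro t _ hpre
  unfold Spec_extract_route_info extract_route_info extract_route_info_alt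
  rw [pvInit, pvFoldA t hpre none none none]
  have hshared : pvOrigRes t none
      = (((t.filter pvIsBrand).map (fun r => pvCell r 2)).find? pvTruthy).getD none := rfl
  have hcode : pvCodeRes t none
      = (if ((t.filter pvIsRoute).map (fun r => pvCell r 1)).isEmpty then none
         else pvCell ((t.filter pvIsRoute).map (fun r => pvCell r 1)) (-1)) := by
    rw [pvCodeRes]
    cases hc : (t.filter pvIsRoute).map (fun r => pvCell r 1) with
    | nil => rfl
    | cons a l => simp [pvCell, PySem.List.pyGet?_neg_one]
  simp only [pvMkd, hshared, hcode]
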